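-- pv_equiv track=rewrite | github.com/Angelvalkov2003/openai_pricing_scraped | openai_models/OpenAIScraper_3.py | _parse_table_section
-- ===== SOURCE A (Python) =====
-- from typing import Dict, List, Optional, Any, Tuple
--
-- def _parse_table_section(
--     lines: List[str], start_idx: int
-- ) -> Tuple[List[Dict[str, str]], int, List[str]]:
--     """
--     Parse one pipe-markdown table. Returns (row dicts, next index, headers).
--     """
--     data: List[Dict[str, str]] = []
--     idx = start_idx
--     while idx < len(lines) and not lines[idx].strip().startswith('|'):
--         idx += 1
--     if idx >= len(lines):
--         return data, idx, []
--     headers = [h.strip() for h in lines[idx].split('|')[1:-1]]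
--     idx += 1
--     if idx < len(lines) and '|--' in lines[idx]:
--         idx += 1
--     while idx < len(lines):
--         line = lines[idx].strip()
--         if not line or not line.startswith('|'):
--             break
--         if '|--' in line:
--             idx += 1
--             continue
--         row = [cell.strip() for cell in line.split('|')[1:-1]]
--         if len(row) == len(headers):
--             data.append(dict(zip(headers, row)))
--         idx += 1
--     return data, idx, headers
-- ===== SOURCE B (Python) =====
-- from typing import Dict, List, Tuple
--
-- # finite-state machine states
-- _SEEK, _SEP, _ROWS = 0, 1, 2
--
--
-- def _parse_table_section(
--     lines: List[str], start_idx: int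
-- ) -> Tuple[List[Dict[str, str]], int, List[str]]:
--     """Parse one pipe-markdown table. Returns (row dicts, next index, headers).
--
--     Single for-loop state machine over line positions (SEEK header -> SEP
--     separator check -> ROWS), with an explicitly maintained end index."""
--     data: List[Dict[str, str]] = []
--     headers: List[str] = []
--     end = start_idx
--     state = _SEEK
--     for pos in range(start_idx, len(lines)):
--         raw = lines[pos]
--         s = raw.strip()
--         if state == _SEEK:
--             if s.startswith('|'):
--                 headers = [c.strip() for c in raw.split('|')[1:-1]]
--                 state = _SEP
--             end = pos + 1
--             continue
--         if state == _SEP: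
--             state = _ROWS
--             if '|--' in raw:
--                 end = pos + 1
--                 continue
--         # state == _ROWS
--         if not s or not s.startswith('|'):
--             break
--         if '|--' not in s:
--             row = [c.strip() for c in s.split('|')[1:-1]]
--             if len(row) == len(headers):
--                 data.append(dict(zip(headers, row)))
--         end = pos + 1
--     return data, end, headers
-- ===== Notes on version B (the rewrite author's own statement) =====
-- stated objective: alternative
-- what changed: A is a sequence of phase loops (a skip-while, header parse, a one-shot separator skip, then a row while-loop with break/continue); B is a single for-loop finite-state machine over line positions (states SEEK/SEP/ROWS) that maintains the end index explicitly and accumulates rows as it transitions.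
import Mathlib
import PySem

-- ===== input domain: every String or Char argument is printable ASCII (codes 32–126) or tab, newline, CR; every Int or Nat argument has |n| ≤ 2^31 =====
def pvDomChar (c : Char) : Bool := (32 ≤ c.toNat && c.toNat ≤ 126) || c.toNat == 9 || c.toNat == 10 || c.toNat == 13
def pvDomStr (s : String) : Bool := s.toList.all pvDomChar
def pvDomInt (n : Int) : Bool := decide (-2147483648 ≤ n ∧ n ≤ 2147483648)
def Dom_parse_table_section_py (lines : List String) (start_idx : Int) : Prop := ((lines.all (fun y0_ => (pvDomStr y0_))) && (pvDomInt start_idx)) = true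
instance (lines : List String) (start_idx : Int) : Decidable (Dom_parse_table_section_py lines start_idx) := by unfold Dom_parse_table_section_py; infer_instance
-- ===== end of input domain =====

-- B replaces A's sequence of phase loops (skip-while, header parse, separator skip, row
-- while-loop with break/continue) by a single for-loop finite-state machine over line
-- positions (states SEEK=0 / SEP=1 / ROWS=2) with an explicitly maintained end index.

-- shared primitive helpers: both Pythons contain the very same expressions
-- '[c.strip() for c in s.split('|')[1:-1]]' and 'dict(zip(headers, row))'
def pvCells (s : String) : List String :=
  (PySem.List.slice ((PySem.Str.split? s "|").getD []) (some 1) (some (-1))).map PySem.Str.strip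

def pvDictZip (headers row : List String) : List (String × String) :=
  ((headers.zip row).foldl (fun d p => d.insert p.1 p.2) (PySem.Dict.empty : PySem.Dict String String)).items

-- ===== PORT A =====
-- 'while idx < len(lines) and not lines[idx].strip().startswith("|"): idx += 1'
-- (fuel = the loop's remaining-iteration bound (len - idx).toNat; it only makes the loop total)
def pvA_skip (lines : List String) : Nat → Int → Int
  | 0, idx => idx
  | fuel + 1, idx =>
    if idx < (lines.length : Int) &&
        !PySem.Str.startswith (PySem.Str.strip (PySem.List.pyGetD lines idx "")) "|" then
      pvA_skip lines fuel (idx + 1)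
    else idx

-- the row-collecting while-loop, accumulating (data, idx)
def pvA_loop (lines headers : List String) :
    Nat → Int → List (List (String × String)) → List (List (String × String)) × Int
  | 0, idx, data => (data, idx)
  | fuel + 1, idx, data =>
    if idx < (lines.length : Int) then
      let line := PySem.Str.strip (PySem.List.pyGetD lines idx "")
      if line == "" || !PySem.Str.startswith line "|" then (data, idx)
      else if PySem.Str.isIn "|--" line then pvA_loop lines headers fuel (idx + 1) data
      else
        let row := pvCells line
        if row.length == headers.length then
          pvA_loop lines headers fuel (idx + 1) (data ++ [pvDictZip headers row])
        else pvA_loop lines headers fuel (idx + 1) data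
    else (data, idx)

def parse_table_section_py (lines : List String) (start_idx : Int) :
    (List (List (String × String))) × Int × List String :=
  let idx := pvA_skip lines ((lines.length : Int) - start_idx).toNat start_idx
  if (lines.length : Int) ≤ idx then ([], idx, [])
  else
    let headers := pvCells (PySem.List.pyGetD lines idx "")
    let idx1 := idx + 1
    let idx2 := if idx1 < (lines.length : Int) && PySem.Str.isIn "|--" (PySem.List.pyGetD lines idx1 "") then idx1 + 1 else idx1
    let r := pvA_loop lines headers ((lines.length : Int) - idx2).toNat idx2 []
    (r.1, r.2, headers)

-- ===== PORT B =====
-- the state machine: state 0 = SEEK, 1 = SEP, 2 = ROWS; 'break' returns (data, endi, headers)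
-- (fuel = the remaining-position bound (len - pos).toNat; it only makes the loop total)
def pvB_loop (lines : List String) :
    Nat → Int → Nat → List String → List (List (String × String)) → Int →
    (List (List (String × String))) × Int × List String
  | 0, _, _, headers, data, endi => (data, endi, headers)
  | fuel + 1, pos, state, headers, data, endi =>
    if pos < (lines.length : Int) then
      let raw := PySem.List.pyGetD lines pos ""
      let s := PySem.Str.strip raw
      if state == 0 then
        if PySem.Str.startswith s "|" then
          pvB_loop lines fuel (pos + 1) 1 (pvCells raw) data (pos + 1)
        else
          pvB_loop lines fuel (pos + 1) 0 headers data (pos + 1)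
      else if state == 1 && PySem.Str.isIn "|--" raw then
        pvB_loop lines fuel (pos + 1) 2 headers data (pos + 1)
      else if s == "" || !PySem.Str.startswith s "|" then
        (data, endi, headers)
      else if !PySem.Str.isIn "|--" s then
        let row := pvCells s
        if row.length == headers.length then
          pvB_loop lines fuel (pos + 1) 2 headers (data ++ [pvDictZip headers row]) (pos + 1)
        else
          pvB_loop lines fuel (pos + 1) 2 headers data (pos + 1)
      else
        pvB_loop lines fuel (pos + 1) 2 headers data (pos + 1)
    else (data, endi, headers)

def parse_table_section_py_alt (lines : List String) (start_idx : Int) :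
    (List (List (String × String))) × Int × List String :=
  pvB_loop lines ((lines.length : Int) - start_idx).toNat start_idx 0 [] [] start_idx

-- ===== PRECONDITION & SPEC =====
-- Pre_ is exactly where the Python A returns: for start_idx < -len(lines) the very first
-- lines[idx] access raises IndexError (and B raises there too); nothing A returns on is excluded.
def Pre_parse_table_section_py (lines : List String) (start_idx : Int) : Prop :=
  -(lines.length : Int) ≤ start_idx
instance (lines : List String) (start_idx : Int) : Decidable (Pre_parse_table_section_py lines start_idx) := by unfold Pre_parse_table_section_py; infer_instance

def pvWitness_parse_table_section_py : List String × Int :=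
  (["| a | b |", "|---|---|", "| 1 | 2 |", ""], 0)

def Spec_parse_table_section_py (lines : List String) (start_idx : Int) (out : (List (List (String × String))) × Int × List String) : Prop := out = parse_table_section_py_alt lines start_idx
instance (lines : List String) (start_idx : Int) (out : (List (List (String × String))) × Int × List String) : Decidable (Spec_parse_table_section_py lines start_idx out) := by unfold Spec_parse_table_section_py; infer_instance

-- ===== CLAIM (what is proved, stated in full; the proofs are below) =====
def Claim_equal_parse_table_section_py : Prop := ∀ (lines : List String) (start_idx : Int), Dom_parse_table_section_py lines start_idx → Pre_parse_table_section_py lines start_idx → Spec_parse_table_section_py lines start_idx (parse_table_section_py lines start_idx)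

-- ===== LEMMAS AND PROOFS =====

-- A's body after the skip loop, as a function of the skip result (definitional repackaging)
def pvARest (lines : List String) (idx : Int) :
    (List (List (String × String))) × Int × List String :=
  if (lines.length : Int) ≤ idx then ([], idx, [])
  else
    let headers := pvCells (PySem.List.pyGetD lines idx "")
    let idx1 := idx + 1
    let idx2 := if idx1 < (lines.length : Int) && PySem.Str.isIn "|--" (PySem.List.pyGetD lines idx1 "") then idx1 + 1 else idx1
    let r := pvA_loop lines headers ((lines.length : Int) - idx2).toNat idx2 []
    (r.1, r.2, headers)

theorem pvA_eq_rest (lines : List String) (start_idx : Int) :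
    parse_table_section_py lines start_idx =
      pvARest lines (pvA_skip lines ((lines.length : Int) - start_idx).toNat start_idx) := rfl

-- A's row loop returns its state unchanged once the index is past the end, whatever the fuel
theorem pvA_loop_past (lines headers : List String) (fa : Nat) (idx : Int)
    (data : List (List (String × String))) (h : ¬ idx < (lines.length : Int)) :
    pvA_loop lines headers fa idx data = (data, idx) := by
  cases fa with
  | zero => rfl
  | succ fa => rw [pvA_loop, if_neg h]

-- state ROWS of B runs A's row while-loop (invariant: end index = current position);
-- any fuels at least the loops' remaining-iteration bounds give the loops' values
theorem pvL2 (lines headers : List String) :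
    ∀ (fb fa : Nat) (idx : Int) (data : List (List (String × String))),
      ((lines.length : Int) - idx).toNat ≤ fa → ((lines.length : Int) - idx).toNat ≤ fb →
      pvB_loop lines fb idx 2 headers data idx =
        ((pvA_loop lines headers fa idx data).1, (pvA_loop lines headers fa idx data).2, headers) := by
  intro fb
  induction fb with
  | zero =>
    intro fa idx data hfa hfb
    have h : ¬ idx < (lines.length : Int) := by omega
    rw [pvA_loop_past lines headers fa idx data h]
    rfl
  | succ fb ih =>
    intro fa idx data hfa hfb
    by_cases h : idx < (lines.length : Int)
    · obtain ⟨fa', rfl⟩ : ∃ fa', fa = fa' + 1 := ⟨fa - 1, by omega⟩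
      rw [pvB_loop, if_pos h, pvA_loop, if_pos h]
      simp only [Nat.reduceBEq, Bool.false_and, Bool.false_eq_true, if_false]
      by_cases he : (PySem.Str.strip (PySem.List.pyGetD lines idx "") == "" ||
          !PySem.Str.startswith (PySem.Str.strip (PySem.List.pyGetD lines idx "")) "|") = true
      · simp only [he, if_true]
      · simp only [he]
        by_cases hin : PySem.Str.isIn "|--" (PySem.Str.strip (PySem.List.pyGetD lines idx "")) = true
        · simp only [hin, Bool.not_true, Bool.false_eq_true, if_false, if_true]
          exact ih fa' (idx + 1) data (by omega) (by omega)
        · simp only [Bool.not_eq_true] at hin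
          simp only [hin, Bool.not_false, if_true, Bool.false_eq_true, if_false]
          by_cases hl : ((pvCells (PySem.Str.strip (PySem.List.pyGetD lines idx ""))).length == headers.length) = true
          · simp only [hl, if_true]
            exact ih fa' (idx + 1) (data ++ [pvDictZip headers (pvCells (PySem.Str.strip (PySem.List.pyGetD lines idx "")))]) (by omega) (by omega)
          · simp only [hl, Bool.false_eq_true, if_false]
            exact ih fa' (idx + 1) data (by omega) (by omega)
    · rw [pvB_loop, if_neg h, pvA_loop_past lines headers fa idx data h]

-- state SEP of B performs A's one-shot separator skip and then runs state ROWS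
theorem pvL1 (lines headers : List String) :
    ∀ (fb : Nat) (j : Int) (data : List (List (String × String))),
      ((lines.length : Int) - j).toNat ≤ fb →
      pvB_loop lines fb j 1 headers data j =
        (let j2 := if j < (lines.length : Int) && PySem.Str.isIn "|--" (PySem.List.pyGetD lines j "") then j + 1 else j;
         ((pvA_loop lines headers ((lines.length : Int) - j2).toNat j2 data).1,
          (pvA_loop lines headers ((lines.length : Int) - j2).toNat j2 data).2, headers)) := by
  intro fb j data hfb
  by_cases h : j < (lines.length : Int)
  · obtain ⟨fb', rfl⟩ : ∃ fb', fb = fb' + 1 := ⟨fb - 1, by omega⟩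
    by_cases hsep : PySem.Str.isIn "|--" (PySem.List.pyGetD lines j "") = true
    · rw [pvB_loop, if_pos h]
      simp only [Nat.reduceBEq, Bool.false_eq_true, if_false, hsep, Bool.true_and, if_true,
        h, decide_true]
      exact pvL2 lines headers fb' (((lines.length : Int) - (j + 1)).toNat) (j + 1) data (le_refl _) (by omega)
    · simp only [Bool.not_eq_true] at hsep
      rw [pvB_loop, if_pos h]
      simp only [Nat.reduceBEq, Bool.false_eq_true, if_false, hsep, Bool.and_false]
      obtain ⟨m, hm⟩ : ∃ m, ((lines.length : Int) - j).toNat = m + 1 := ⟨((lines.length : Int) - j).toNat - 1, by omega⟩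
      rw [hm, pvA_loop, if_pos h]
      simp only
      by_cases he : (PySem.Str.strip (PySem.List.pyGetD lines j "") == "" ||
          !PySem.Str.startswith (PySem.Str.strip (PySem.List.pyGetD lines j "")) "|") = true
      · simp only [he, if_true]
      · simp only [he]
        by_cases hin : PySem.Str.isIn "|--" (PySem.Str.strip (PySem.List.pyGetD lines j "")) = true
        · simp only [hin, Bool.not_true, Bool.false_eq_true, if_false, if_true]
          exact pvL2 lines headers fb' m (j + 1) data (by omega) (by omega)
        · simp only [Bool.not_eq_true] at hin
          simp only [hin, Bool.not_false, if_true, Bool.false_eq_true, if_false]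
          by_cases hl : ((pvCells (PySem.Str.strip (PySem.List.pyGetD lines j ""))).length == headers.length) = true
          · simp only [hl, if_true]
            exact pvL2 lines headers fb' m (j + 1) (data ++ [pvDictZip headers (pvCells (PySem.Str.strip (PySem.List.pyGetD lines j "")))]) (by omega) (by omega)
          · simp only [hl, Bool.false_eq_true, if_false]
            exact pvL2 lines headers fb' m (j + 1) data (by omega) (by omega)
  · have hc : (decide (j < (lines.length : Int)) && PySem.Str.isIn "|--" (PySem.List.pyGetD lines j "")) = false := by
      simp [h]
    have hm : ((lines.length : Int) - j).toNat = 0 := by omega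
    cases fb with
    | zero => simp only [hc, Bool.false_eq_true, if_false, hm]; rfl
    | succ fb => rw [pvB_loop, if_neg h]; simp only [hc, Bool.false_eq_true, if_false, hm]; rfl

-- state SEEK of B runs A's skip loop and then the rest of A
theorem pvL0 (lines : List String) :
    ∀ (fb fa : Nat) (pos : Int),
      ((lines.length : Int) - pos).toNat ≤ fa → ((lines.length : Int) - pos).toNat ≤ fb →
      pvB_loop lines fb pos 0 [] [] pos = pvARest lines (pvA_skip lines fa pos) := by
  intro fb
  induction fb with
  | zero =>
    intro fa pos hfa hfb
    have h : ¬ pos < (lines.length : Int) := by omega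
    have hskip : pvA_skip lines fa pos = pos := by
      cases fa with
      | zero => rfl
      | succ fa => rw [pvA_skip]; simp [h]
    rw [hskip]
    unfold pvARest
    rw [if_pos (by omega)]
    rfl
  | succ fb ih =>
    intro fa pos hfa hfb
    by_cases h : pos < (lines.length : Int)
    · obtain ⟨fa', rfl⟩ : ∃ fa', fa = fa' + 1 := ⟨fa - 1, by omega⟩
      by_cases hst : PySem.Str.startswith (PySem.Str.strip (PySem.List.pyGetD lines pos "")) "|" = true
      · rw [pvA_skip]
        simp only [hst, Bool.not_true, Bool.and_false, Bool.false_eq_true, if_false]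
        rw [pvB_loop, if_pos h]
        simp only [Nat.reduceBEq, if_true, hst]
        unfold pvARest
        rw [if_neg (by omega)]
        exact pvL1 lines (pvCells (PySem.List.pyGetD lines pos "")) fb (pos + 1) [] (by omega)
      · rw [pvA_skip]
        simp only [Bool.not_eq_true] at hst
        simp only [hst, Bool.not_false, Bool.and_true, h, decide_true, if_true]
        rw [pvB_loop, if_pos h]
        simp only [Nat.reduceBEq, if_true, hst, Bool.false_eq_true, if_false]
        exact ih fa' (pos + 1) (by omega) (by omega)
    · have hskip : pvA_skip lines fa pos = pos := by
        cases fa with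
        | zero => rfl
        | succ fa => rw [pvA_skip]; simp [h]
      rw [pvB_loop, if_neg h, hskip]
      unfold pvARest
      rw [if_pos (by omega)]

-- ===== VERDICT (by name: the statement is the Claim_ definition above) =====
theorem parse_table_section_py_spec : Claim_equal_parse_table_section_py := by
  intro lines start_idx _hDom _hPre
  unfold Spec_parse_table_section_py parse_table_section_py_alt
  rw [pvA_eq_rest]
  exact (pvL0 lines _ _ start_idx (le_refl _) (le_refl _)).symm
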